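-- pv_equiv track=rewrite | github.com/Daniel-Blankenship/Weekly-Coding-Challenges | 08_16_2021/word_bucket.py | bucketize
-- ===== SOURCE A (Python) =====
-- def bucketize(phrase, max_characters):
--
--     phrase_list = phrase.split()
--
--     output = []
--     bucket = ""
--
--     for word in phrase_list:
--         # if the word can fit in an empty bucket
--         if len(word) <= max_characters:
--             # if the bucket is partially filled
--             if len(bucket) > 0:
--                 # if the word fits in the partially filled bucket
--                 if len(bucket + word) + 1 <= max_characters:
--                     bucket += " " + word
--                 else:
--                     # empty the bucket into the output so the word can fit
--                     output.append(bucket)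
--                     bucket = word
--             else:
--                 bucket = word
--         else:
--             # returns an empty array if the entire phrase can't be bucketized
--             return []
--
--     # if there is anything left over in the bucket, add it to the output
--     if len(bucket) > 0:
--         output.append(bucket)
--
--     return output
-- ===== SOURCE B (Python) =====
-- def bucketize(phrase, max_characters):
--     words = phrase.split()
--     # validation pass: one oversized word anywhere empties the whole result
--     if any(len(w) > max_characters for w in words):
--         return []
--     # line-at-a-time packing: repeatedly split off the maximal prefix that
--     # fits on one line, emit it joined, and continue with the rest
--     out = []
--     rest = words
--     while rest:
--         width = len(rest[0])
--         j = 1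
--         while j < len(rest) and width + 1 + len(rest[j]) <= max_characters:
--             width += 1 + len(rest[j])
--             j += 1
--         out.append(" ".join(rest[:j]))
--         rest = rest[j:]
--     return out
-- ===== Notes on version B (the rewrite author's own statement) =====
-- stated objective: alternative
-- what changed: B first validates (any oversized word empties the result), then packs line-at-a-time: an outer loop repeatedly splits off the maximal prefix of remaining words that fits on one line and emits it joined, replacing A's word-at-a-time greedy loop that grows a string bucket and early-returns mid-loop.
import Mathlib
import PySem

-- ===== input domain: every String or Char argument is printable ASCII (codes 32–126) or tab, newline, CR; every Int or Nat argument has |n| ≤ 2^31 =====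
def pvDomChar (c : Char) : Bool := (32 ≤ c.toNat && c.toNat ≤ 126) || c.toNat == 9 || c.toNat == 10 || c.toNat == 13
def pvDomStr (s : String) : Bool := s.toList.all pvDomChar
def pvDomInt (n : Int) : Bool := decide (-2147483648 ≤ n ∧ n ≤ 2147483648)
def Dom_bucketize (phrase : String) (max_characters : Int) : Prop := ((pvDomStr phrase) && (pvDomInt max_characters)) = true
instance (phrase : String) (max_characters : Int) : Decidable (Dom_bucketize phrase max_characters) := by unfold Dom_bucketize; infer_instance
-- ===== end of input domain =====

-- B packs line-at-a-time (split off the maximal prefix of words that fits, emit it joined,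
-- continue on the rest) after an upfront validation pass, instead of A's word-at-a-time
-- string accumulator with a mid-loop early return; objective: alternative decomposition.

-- ===== PORT A =====
-- A's for-loop over the split words; the early 'return []' is the last branch.
def bucketizeLoop (max_characters : Int) : List String → List String → String → List String
  | [], output, bucket =>
      if 0 < PySem.Str.len bucket then output ++ [bucket] else output
  | word :: rest, output, bucket =>
      if PySem.Str.len word ≤ max_characters then
        if 0 < PySem.Str.len bucket then
          if PySem.Str.len (bucket ++ word) + 1 ≤ max_characters then
            bucketizeLoop max_characters rest output (bucket ++ " " ++ word)
          else
            bucketizeLoop max_characters rest (output ++ [bucket]) word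
        else
          bucketizeLoop max_characters rest output word
      else []

def bucketize (phrase : String) (max_characters : Int) : List String :=
  bucketizeLoop max_characters (PySem.Str.split₀ phrase) [] ""

-- ===== PORT B =====
-- B's inner scan: given the width already on the line, split off the further words that fit.
def takeFit (max_characters : Int) (width : Int) : List String → List String × List String
  | [] => ([], [])
  | w :: ws =>
      if width + 1 + PySem.Str.len w ≤ max_characters then
        let pr := takeFit max_characters (width + 1 + PySem.Str.len w) ws
        (w :: pr.1, pr.2)
      else ([], w :: ws)

-- termination measure for linesB (the rest left by takeFit is no longer than its input)
theorem takeFit_snd_length (max_characters width : Int) (ws : List String) :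
    (takeFit max_characters width ws).2.length ≤ ws.length := by
  induction ws generalizing width with
  | nil => simp [takeFit]
  | cons w rest ih =>
    simp only [takeFit]
    split
    · exact Nat.le_succ_of_le (ih _)
    · simp

-- B's outer loop: emit the maximal fitting prefix as one line, recurse on the rest.
def linesB (max_characters : Int) : List String → List String
  | [] => []
  | w :: ws =>
      let pr := takeFit max_characters (PySem.Str.len w) ws
      PySem.Str.join " " (w :: pr.1) :: linesB max_characters pr.2
  termination_by ws => ws.length
  decreasing_by exact Nat.lt_succ_of_le (takeFit_snd_length _ _ _)

def bucketize_alt (phrase : String) (max_characters : Int) : List String :=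
  let words := PySem.Str.split₀ phrase
  if words.any (fun w => max_characters < PySem.Str.len w) then []
  else linesB max_characters words

-- ===== PRECONDITION & SPEC =====
def Spec_bucketize (phrase : String) (max_characters : Int) (out : List String) : Prop := out = bucketize_alt phrase max_characters
instance (phrase : String) (max_characters : Int) (out : List String) : Decidable (Spec_bucketize phrase max_characters out) := by unfold Spec_bucketize; infer_instance

-- ===== CLAIM (what is proved, stated in full; the proofs are below) =====
def Claim_equal_bucketize : Prop := ∀ (phrase : String) (max_characters : Int), Dom_bucketize phrase max_characters → Spec_bucketize phrase max_characters (bucketize phrase max_characters)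

-- ===== LEMMAS AND PROOFS =====

-- every piece produced by Python's whitespace split() is a nonempty word
theorem chars_split₀_go_ne_nil (s cur : List Char) (acc : List (List Char))
    (hacc : ∀ w ∈ acc, w ≠ []) (w : List Char) (hw : w ∈ PySem.Chars.split₀.go s cur acc) :
    w ≠ [] := by
  induction s generalizing cur acc with
  | nil =>
    simp only [PySem.Chars.split₀.go] at hw
    split at hw
    · exact hacc w (List.mem_reverse.mp hw)
    · rcases List.mem_cons.mp (List.mem_reverse.mp hw) with h | h
      · subst h
        rename_i hne
        simp [List.isEmpty_iff] at hne
        simpa using hne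
      · exact hacc w h
  | cons c rest ih =>
    simp only [PySem.Chars.split₀.go] at hw
    split at hw
    · split at hw
      · exact ih _ _ hacc hw
      · refine ih _ _ ?_ hw
        intro v hv
        rcases List.mem_cons.mp hv with h | h
        · subst h
          simp_all
        · exact hacc v h
    · exact ih _ _ hacc hw

theorem split₀_pos_len (phrase : String) (w : String) (hw : w ∈ PySem.Str.split₀ phrase) :
    0 < PySem.Str.len w := by
  have h : w.toList ∈ PySem.Chars.split₀ phrase.toList := by
    rw [← PySem.Str.split₀_map_toList]
    exact List.mem_map_of_mem hw
  have hne : w.toList ≠ [] :=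
    chars_split₀_go_ne_nil _ [] [] (by simp) _ h
  rw [PySem.Str.len_eq]
  have : w.toList.length ≠ 0 := fun h0 => hne (List.length_eq_zero_iff.mp h0)
  omega

theorem str_join_cons_cons (w x : String) (xs : List String) :
    PySem.Str.join " " (w :: x :: xs) = w ++ " " ++ PySem.Str.join " " (x :: xs) := by
  apply String.toList_inj.mp
  simp [PySem.Str.toList_join, PySem.Chars.join_cons_cons]

theorem str_join_singleton (w : String) : PySem.Str.join " " [w] = w := by
  apply String.toList_inj.mp
  simp [PySem.Str.toList_join, PySem.Chars.join_singleton]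

theorem foldl_sep_append (xs : List String) (a w : String) :
    a ++ " " ++ xs.foldl (fun b x => b ++ " " ++ x) w
      = xs.foldl (fun b x => b ++ " " ++ x) (a ++ " " ++ w) := by
  induction xs generalizing w with
  | nil => rfl
  | cons x rest ih =>
    simp only [List.foldl_cons]
    rw [ih (w ++ " " ++ x)]
    simp only [String.append_assoc]

-- " ".join(w :: p) computed as B's line, seen as A's left fold of " " ++ word
theorem join_cons_foldl (p : List String) (w : String) :
    PySem.Str.join " " (w :: p) = p.foldl (fun a x => a ++ " " ++ x) w := by
  induction p generalizing w with
  | nil => exact str_join_singleton w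
  | cons x xs ih =>
    rw [str_join_cons_cons, ih x, List.foldl_cons, foldl_sep_append]

-- if some remaining word is oversized, A's loop ends in the early 'return []'
theorem loopA_long (max_characters : Int) (ws : List String) (out : List String) (bucket : String)
    (h : ∃ w ∈ ws, max_characters < PySem.Str.len w) :
    bucketizeLoop max_characters ws out bucket = [] := by
  induction ws generalizing out bucket with
  | nil => simp at h
  | cons w rest ih =>
    by_cases hw : PySem.Str.len w ≤ max_characters
    · have hrest : ∃ v ∈ rest, max_characters < PySem.Str.len v := by
        rcases h with ⟨v, hv, hlen⟩
        rcases List.mem_cons.mp hv with h1 | h1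
        · subst h1; omega
        · exact ⟨v, h1, hlen⟩
      simp only [bucketizeLoop, if_pos hw]
      split_ifs <;> exact ih _ _ hrest
    · simp only [bucketizeLoop, if_neg hw]

-- loop correspondence when every remaining word fits: A's partial bucket b corresponds to
-- the line B is about to finish, whose remaining words takeFit splits off
theorem loop_lines (max_characters : Int) (ws : List String)
    (hws : ∀ w ∈ ws, PySem.Str.len w ≤ max_characters ∧ 0 < PySem.Str.len w)
    (out : List String) (b : String) (hb : 0 < PySem.Str.len b) :
    bucketizeLoop max_characters ws out b
      = out ++ ((takeFit max_characters (PySem.Str.len b) ws).1.foldl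
            (fun a x => a ++ " " ++ x) b)
          :: linesB max_characters (takeFit max_characters (PySem.Str.len b) ws).2 := by
  induction ws generalizing out b with
  | nil => simp only [bucketizeLoop, takeFit, linesB, List.foldl_nil, if_pos hb]
  | cons w rest ih =>
    have hwfit := (hws w (by simp)).1
    have hwpos := (hws w (by simp)).2
    have hrest : ∀ v ∈ rest, PySem.Str.len v ≤ max_characters ∧ 0 < PySem.Str.len v :=
      fun v hv => hws v (by simp [hv])
    have hlapp : PySem.Str.len (b ++ w) = PySem.Str.len b + PySem.Str.len w :=
      PySem.Str.len_append _ _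
    by_cases hfit : PySem.Str.len b + 1 + PySem.Str.len w ≤ max_characters
    · have hlen2 : PySem.Str.len (b ++ " " ++ w)
          = PySem.Str.len b + 1 + PySem.Str.len w := by
        rw [PySem.Str.len_append, PySem.Str.len_append]
        have : PySem.Str.len " " = 1 := by decide
        omega
      simp only [bucketizeLoop, if_pos hwfit, if_pos hb, if_pos (by omega :
        PySem.Str.len (b ++ w) + 1 ≤ max_characters), takeFit, if_pos hfit]
      rw [ih hrest out (b ++ " " ++ w) (by rw [hlen2]; omega), hlen2]
      simp [List.foldl_cons]
    · simp only [bucketizeLoop, if_pos hwfit, if_pos hb, if_neg (by omega :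
        ¬ (PySem.Str.len (b ++ w) + 1 ≤ max_characters)), takeFit, if_neg hfit]
      rw [ih hrest (out ++ [b]) w hwpos]
      simp only [List.foldl_nil, List.append_assoc, List.cons_append, List.nil_append]
      rw [linesB]
      simp [join_cons_foldl]

-- ===== VERDICT (by name: the statement is the Claim_ definition above) =====
theorem bucketize_spec : Claim_equal_bucketize := by
  intro phrase max_characters _
  unfold Spec_bucketize bucketize bucketize_alt
  by_cases hlong : ∃ w ∈ PySem.Str.split₀ phrase, max_characters < PySem.Str.len w
  · rw [loopA_long max_characters _ [] "" hlong]
    simp only [List.any_eq_true, decide_eq_true_eq]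
    rw [if_pos hlong]
  · simp only [List.any_eq_true, decide_eq_true_eq]
    rw [if_neg hlong]
    push Not at hlong
    cases hsplit : PySem.Str.split₀ phrase with
    | nil => simp [bucketizeLoop, linesB]
    | cons w rest =>
      have hwmem : w ∈ PySem.Str.split₀ phrase := by rw [hsplit]; simp
      have hwfit : PySem.Str.len w ≤ max_characters := le_of_not_gt (by
        intro h; exact absurd h (by simpa using hlong w hwmem))
      have hwpos : 0 < PySem.Str.len w := split₀_pos_len phrase w hwmem
      have hrest : ∀ v ∈ rest, PySem.Str.len v ≤ max_characters ∧ 0 < PySem.Str.len v := by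
        intro v hv
        have hvm : v ∈ PySem.Str.split₀ phrase := by rw [hsplit]; simp [hv]
        exact ⟨le_of_not_gt (fun h => absurd h (by simpa using hlong v hvm)),
          split₀_pos_len phrase v hvm⟩
      have h0 : ¬ (0 < PySem.Str.len "") := by decide
      simp only [bucketizeLoop, if_pos hwfit, if_neg h0]
      rw [loop_lines max_characters rest hrest [] w hwpos, linesB]
      simp [join_cons_foldl]
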